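-- pv_equiv track=rewrite | github.com/danxor/advent_of_code_2023 | src/day03.py | find_number_coordinates
-- ===== SOURCE A (Python) =====
-- def find_number_coordinates(s: str) -> list:
-- 	coords = []
--
-- 	start = None
--
-- 	for i in range(len(s)):
-- 		if s[i].isdigit():
-- 			if start is None:
-- 				start = i
-- 		else:
-- 			if start is not None:
-- 				coords.append((start, i))
-- 				start = None
--
-- 	if start is not None:
-- 		coords.append((start, len(s)))
--
-- 	return coords
-- ===== SOURCE B (Python) =====
-- def find_number_coordinates(s: str) -> list:
-- 	coords = []
-- 	i = 0
-- 	n = len(s)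
-- 	while i < n:
-- 		if s[i].isdigit():
-- 			j = i
-- 			while j < n and s[j].isdigit():
-- 				j += 1
-- 			coords.append((i, j))
-- 			i = j
-- 		else:
-- 			i += 1
-- 	return coords
-- ===== Notes on version B (the rewrite author's own statement) =====
-- stated objective: alternative
-- what changed: Replaced the start-sentinel state machine with post-loop flush by a two-pointer run scanner: on hitting a digit an inner scan finds the end of the run and emits (start, end) immediately, so no Option state and no flush are needed.
import Mathlib
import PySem

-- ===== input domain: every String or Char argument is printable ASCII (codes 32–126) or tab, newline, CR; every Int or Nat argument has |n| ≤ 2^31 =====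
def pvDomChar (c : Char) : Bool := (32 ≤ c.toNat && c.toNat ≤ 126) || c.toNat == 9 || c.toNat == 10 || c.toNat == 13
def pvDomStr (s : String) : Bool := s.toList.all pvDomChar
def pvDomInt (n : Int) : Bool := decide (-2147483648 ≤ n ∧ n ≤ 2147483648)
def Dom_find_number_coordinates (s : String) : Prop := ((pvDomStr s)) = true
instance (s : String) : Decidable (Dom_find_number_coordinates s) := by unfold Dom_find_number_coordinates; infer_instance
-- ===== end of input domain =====

-- B replaces A's start-sentinel state machine (with post-loop flush) by a two-pointer
-- run scanner that emits each (start, end) as soon as the digit run ends (objective: alternative).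
-- Char.isDigit is exact for Python's str.isdigit on the ASCII domain Dom.

-- ===== PORT A =====
-- the for-loop of A: state (coords, start), index i carried explicitly
def aGo : List Char → Int → List (Int × Int) × Option Int → List (Int × Int) × Option Int
  | [], _, st => st
  | c :: rest, i, (coords, start) =>
    aGo rest (i + 1)
      (if c.isDigit then
        (coords, match start with | none => some i | some s0 => some s0)
      else
        (match start with | some s0 => (coords ++ [(s0, i)], none) | none => (coords, start)))

def find_number_coordinates (s : String) : List (Int × Int) :=
  let st := aGo s.toList 0 ([], none)
  match st.2 with
  | some s0 => st.1 ++ [(s0, (s.toList.length : Int))]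
  | none => st.1

-- ===== PORT B =====
-- the two-pointer while loop of B: on a digit, the inner scan is takeWhile/dropWhile
def altGo : List Char → Int → List (Int × Int)
  | [], _ => []
  | c :: rest, i =>
    if c.isDigit then
      let d : Int := 1 + (rest.takeWhile Char.isDigit).length
      (i, i + d) :: altGo (rest.dropWhile Char.isDigit) (i + d)
    else
      altGo rest (i + 1)
termination_by cs _ => cs.length
decreasing_by
  · exact Nat.lt_succ_of_le (List.length_dropWhile_le _ _)
  · simp

def find_number_coordinates_alt (s : String) : List (Int × Int) :=
  altGo s.toList 0

-- ===== PRECONDITION & SPEC =====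
def Spec_find_number_coordinates (s : String) (out : List (Int × Int)) : Prop := out = find_number_coordinates_alt s
instance (s : String) (out : List (Int × Int)) : Decidable (Spec_find_number_coordinates s out) := by unfold Spec_find_number_coordinates; infer_instance

-- ===== CLAIM (what is proved, stated in full; the proofs are below) =====
def Claim_equal_find_number_coordinates : Prop := ∀ (s : String), Dom_find_number_coordinates s → Spec_find_number_coordinates s (find_number_coordinates s)

-- ===== LEMMAS AND PROOFS =====

-- the post-loop flush of A, as a function of the final state and the string length
def aFlush (n : Int) (st : List (Int × Int) × Option Int) : List (Int × Int) :=
  match st.2 with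
  | some s0 => st.1 ++ [(s0, n)]
  | none => st.1

-- joint invariant: A's loop-plus-flush from either state equals B's run scan
theorem aGo_altGo (cs : List Char) :
    (∀ (i : Int) (coords : List (Int × Int)),
      aFlush (i + cs.length) (aGo cs i (coords, none)) = coords ++ altGo cs i) ∧
    (∀ (i : Int) (coords : List (Int × Int)) (s0 : Int),
      aFlush (i + cs.length) (aGo cs i (coords, some s0)) =
        coords ++ (s0, i + ((cs.takeWhile Char.isDigit).length : Int)) ::
          altGo (cs.dropWhile Char.isDigit) (i + ((cs.takeWhile Char.isDigit).length : Int))) := by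
  induction cs with
  | nil => simp [aGo, aFlush, altGo]
  | cons c rest ih =>
    obtain ⟨ih1, ih2⟩ := ih
    constructor
    · intro i coords
      by_cases hd : c.isDigit
      · have := ih2 (i + 1) coords i
        simp only [aGo, hd, if_pos, List.length_cons, altGo]
        have e : (i + ((rest.length + 1 : Nat) : Int)) = (i + 1) + (rest.length : Int) := by push_cast; ring
        rw [e, this]
        simp
        constructor <;> ring_nf
      · have := ih1 (i + 1) coords
        simp only [aGo, hd, Bool.false_eq_true, if_false, List.length_cons]
        have e : (i + ((rest.length + 1 : Nat) : Int)) = (i + 1) + (rest.length : Int) := by push_cast; ring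
        rw [e, this]
        simp [altGo, hd]
    · intro i coords s0
      by_cases hd : c.isDigit
      · have := ih2 (i + 1) coords s0
        simp only [aGo, hd, if_pos, List.length_cons]
        have e : (i + ((rest.length + 1 : Nat) : Int)) = (i + 1) + (rest.length : Int) := by push_cast; ring
        rw [e, this]
        simp [hd]
        constructor <;> ring_nf
      · have := ih1 (i + 1) (coords ++ [(s0, i)])
        simp only [aGo, hd, Bool.false_eq_true, if_false, List.length_cons]
        have e : (i + ((rest.length + 1 : Nat) : Int)) = (i + 1) + (rest.length : Int) := by push_cast; ring
        rw [e, this]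
        simp [hd, altGo]

-- ===== VERDICT (by name: the statement is the Claim_ definition above) =====
theorem find_number_coordinates_spec : Claim_equal_find_number_coordinates := by
  intro s _
  show find_number_coordinates s = find_number_coordinates_alt s
  have h := (aGo_altGo s.toList).1 0 []
  simpa [find_number_coordinates, find_number_coordinates_alt, aFlush] using h
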